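-- pv_equiv track=rewrite | github.com/mattbrepo/ClusterBinaryData | ClusterBinaryData.py | my_hamming
-- ===== SOURCE A (Python) =====
-- def my_hamming(point1, point2):
--   dimension = len(point1)
--   a = 0
--   bc = 0
--   for i in range(dimension):
--     if point1[i] == 1 and point2[i] == 1:
--       a = a + 1
--     elif point1[i] == 1 or point2[i] == 1:
--       bc = bc + 1
--   return bc
-- ===== SOURCE B (Python) =====
-- def my_hamming(point1, point2):
--     s1 = set()
--     s2 = set()
--     for i in range(len(point1)):
--         if point1[i] == 1:
--             s1.add(i)
--         if point2[i] == 1: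
--             s2.add(i)
--     return len(s1 ^ s2)
-- ===== Notes on version B (the rewrite author's own statement) =====
-- stated objective: alternative
-- what changed: Instead of branch-counting both/either matches with two integer accumulators, B collects the index sets where each vector is 1 and returns the size of their symmetric difference.
import Mathlib
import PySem

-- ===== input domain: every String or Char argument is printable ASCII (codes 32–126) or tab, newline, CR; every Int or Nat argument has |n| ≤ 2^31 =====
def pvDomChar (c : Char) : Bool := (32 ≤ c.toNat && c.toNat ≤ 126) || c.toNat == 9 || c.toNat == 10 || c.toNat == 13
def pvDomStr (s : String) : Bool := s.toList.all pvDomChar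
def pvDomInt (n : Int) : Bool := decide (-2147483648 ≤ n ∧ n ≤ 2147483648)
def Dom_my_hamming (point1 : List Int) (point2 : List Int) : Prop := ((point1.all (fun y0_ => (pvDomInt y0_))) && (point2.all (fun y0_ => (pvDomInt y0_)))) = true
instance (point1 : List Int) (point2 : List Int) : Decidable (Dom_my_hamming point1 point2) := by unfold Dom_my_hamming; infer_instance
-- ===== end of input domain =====

-- B replaces A's in-loop both/either branch counting by building the two index sets
-- where each vector is 1 and returning the size of their symmetric difference (alternative decomposition, same cost).

-- ===== PORT A =====
def my_hamming (point1 : List Int) (point2 : List Int) : Int :=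
  let dimension : Int := point1.length
  let st := (PySem.List.pyRange 0 dimension 1).foldl
    (fun (st : Int × Int) i =>
      if PySem.List.pyGetD point1 i 0 = 1 ∧ PySem.List.pyGetD point2 i 0 = 1 then
        (st.1 + 1, st.2)
      else if PySem.List.pyGetD point1 i 0 = 1 ∨ PySem.List.pyGetD point2 i 0 = 1 then
        (st.1, st.2 + 1)
      else st) (0, 0)
  st.2

-- ===== PORT B =====
def my_hamming_alt (point1 : List Int) (point2 : List Int) : Int :=
  let st := (PySem.List.pyRange 0 (point1.length : Int) 1).foldl
    (fun (st : PySem.Set Int × PySem.Set Int) i =>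
      (if PySem.List.pyGetD point1 i 0 = 1 then PySem.Set.add st.1 i else st.1,
       if PySem.List.pyGetD point2 i 0 = 1 then PySem.Set.add st.2 i else st.2))
    (PySem.Set.empty, PySem.Set.empty)
  PySem.Set.len (PySem.Set.symmDiff st.1 st.2)

-- ===== PRECONDITION & SPEC =====
-- A raises IndexError (point2[i]) when point2 is shorter than point1; those inputs are excluded.
def Pre_my_hamming (point1 : List Int) (point2 : List Int) : Prop :=
  point1.length ≤ point2.length
instance (point1 : List Int) (point2 : List Int) : Decidable (Pre_my_hamming point1 point2) := by
  unfold Pre_my_hamming; infer_instance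

def pvWitness_my_hamming : List Int × List Int := ([1, 0, 1], [0, 0, 1])

def Spec_my_hamming (point1 : List Int) (point2 : List Int) (out : Int) : Prop := out = my_hamming_alt point1 point2
instance (point1 : List Int) (point2 : List Int) (out : Int) : Decidable (Spec_my_hamming point1 point2 out) := by unfold Spec_my_hamming; infer_instance

-- ===== CLAIM (what is proved, stated in full; the proofs are below) =====
def Claim_equal_my_hamming : Prop := ∀ (point1 : List Int) (point2 : List Int), Dom_my_hamming point1 point2 → Pre_my_hamming point1 point2 → Spec_my_hamming point1 point2 (my_hamming point1 point2)

-- ===== LEMMAS AND PROOFS =====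

-- conditional Set.add over a Nodup list of fresh elements is filter-append
theorem foldl_add_if_filter (q : Int → Prop) [DecidablePred q] (l : List Int) (s : List Int)
    (hnd : l.Nodup) (hfresh : ∀ y ∈ l, y ∉ s) :
    l.foldl (fun (s : PySem.Set Int) i => if q i then PySem.Set.add s i else s) s
      = s ++ l.filter (fun i => decide (q i)) := by
  induction l generalizing s with
  | nil => simp
  | cons x t ih =>
    have hx : x ∉ s := hfresh x (by simp)
    have hnd' : t.Nodup := (List.nodup_cons.mp hnd).2
    have hxt : x ∉ t := (List.nodup_cons.mp hnd).1
    by_cases hq : q x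
    · have hadd : PySem.Set.add s x = s ++ [x] := PySem.Set.add_of_not_mem hx
      have hfresh' : ∀ y ∈ t, y ∉ s ++ [x] := by
        intro y hy
        intro hmem
        rcases List.mem_append.mp hmem with hys | hyx
        · exact hfresh y (by simp [hy]) hys
        · exact hxt ((List.mem_singleton.mp hyx) ▸ hy)
      simp only [List.foldl_cons, if_pos hq, hadd]
      rw [ih (s ++ [x]) hnd' hfresh']
      simp [hq]
    · simp only [List.foldl_cons, if_neg hq]
      rw [ih s hnd' (fun y hy => hfresh y (by simp [hy]))]
      simp [hq]

-- counting lemma: sizes of the two one-sided filters sum to A's either-but-not-both count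
theorem xor_count (p r : Int → Bool) (l : List Int) :
    ((l.filter (fun x => p x && !r x)).length : Int)
      + ((l.filter (fun x => r x && !p x)).length : Int)
      = ((l.countP (fun x => (!p x || !r x) && (p x || r x))) : Int) := by
  induction l with
  | nil => simp
  | cons x t ih =>
    cases hp : p x <;> cases hr : r x <;>
      simp [hp, hr] <;> omega

theorem my_hamming_eq (point1 point2 : List Int) :
    my_hamming point1 point2 = my_hamming_alt point1 point2 := by
  simp only [my_hamming, my_hamming_alt]
  have hAfun : (fun (st : Int × Int) i =>
      if PySem.List.pyGetD point1 i 0 = 1 ∧ PySem.List.pyGetD point2 i 0 = 1 then (st.1 + 1, st.2)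
      else if PySem.List.pyGetD point1 i 0 = 1 ∨ PySem.List.pyGetD point2 i 0 = 1 then (st.1, st.2 + 1)
      else st)
      = (fun (st : Int × Int) i =>
        ((fun (a : Int) i => if PySem.List.pyGetD point1 i 0 = 1 ∧ PySem.List.pyGetD point2 i 0 = 1 then a + 1 else a) st.1 i,
         (fun (b : Int) i => if PySem.List.pyGetD point1 i 0 = 1 ∧ PySem.List.pyGetD point2 i 0 = 1 then b
            else if PySem.List.pyGetD point1 i 0 = 1 ∨ PySem.List.pyGetD point2 i 0 = 1 then b + 1 else b) st.2 i)) := by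
    funext st i
    by_cases h1 : PySem.List.pyGetD point1 i 0 = 1 ∧ PySem.List.pyGetD point2 i 0 = 1 <;>
      by_cases h2 : PySem.List.pyGetD point1 i 0 = 1 ∨ PySem.List.pyGetD point2 i 0 = 1 <;>
      simp [h1, h2]
  rw [hAfun, PySem.List.foldl_prod_mk
      (f := fun (a : Int) i => if PySem.List.pyGetD point1 i 0 = 1 ∧ PySem.List.pyGetD point2 i 0 = 1 then a + 1 else a)
      (g := fun (b : Int) i => if PySem.List.pyGetD point1 i 0 = 1 ∧ PySem.List.pyGetD point2 i 0 = 1 then b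
          else if PySem.List.pyGetD point1 i 0 = 1 ∨ PySem.List.pyGetD point2 i 0 = 1 then b + 1 else b),
    PySem.List.foldl_prod_mk
      (f := fun (s : PySem.Set Int) i => if PySem.List.pyGetD point1 i 0 = 1 then PySem.Set.add s i else s)
      (g := fun (s : PySem.Set Int) i => if PySem.List.pyGetD point2 i 0 = 1 then PySem.Set.add s i else s)]
  have hnd : (PySem.List.pyRange 0 (point1.length : Int) 1).Nodup := PySem.List.nodup_pyRange_one 0 _
  rw [foldl_add_if_filter (fun i => PySem.List.pyGetD point1 i 0 = 1) _ _ hnd (by simp [PySem.Set.empty]),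
      foldl_add_if_filter (fun i => PySem.List.pyGetD point2 i 0 = 1) _ _ hnd (by simp [PySem.Set.empty])]
  simp only [PySem.Set.empty, List.nil_append]
  set R := PySem.List.pyRange 0 (point1.length : Int) 1 with hR
  set p : Int → Bool := fun i => decide (PySem.List.pyGetD point1 i 0 = 1) with hp
  set r : Int → Bool := fun i => decide (PySem.List.pyGetD point2 i 0 = 1) with hr
  -- A's second accumulator counts the exactly-one positions
  have hA : R.foldl (fun (b : Int) i =>
        if PySem.List.pyGetD point1 i 0 = 1 ∧ PySem.List.pyGetD point2 i 0 = 1 then b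
        else if PySem.List.pyGetD point1 i 0 = 1 ∨ PySem.List.pyGetD point2 i 0 = 1 then b + 1 else b) 0
      = ((R.countP (fun i => (!p i || !r i) && (p i || r i))) : Int) := by
    rw [PySem.List.foldl_congr_mem
        (g := fun (b : Int) i => if ¬(PySem.List.pyGetD point1 i 0 = 1 ∧ PySem.List.pyGetD point2 i 0 = 1)
            ∧ (PySem.List.pyGetD point1 i 0 = 1 ∨ PySem.List.pyGetD point2 i 0 = 1) then b + 1 else b)]
    · rw [PySem.List.foldl_ite_add_one]
      simp only [zero_add]
      congr 1
      apply List.countP_congr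
      intro x _
      by_cases h1 : PySem.List.pyGetD point1 x 0 = 1 <;>
        by_cases h2 : PySem.List.pyGetD point2 x 0 = 1 <;> simp [hp, hr, h1, h2]
    · intro acc x _
      by_cases h1 : PySem.List.pyGetD point1 x 0 = 1 <;>
        by_cases h2 : PySem.List.pyGetD point2 x 0 = 1 <;> simp [h1, h2]
  rw [hA]
  -- B's symmetric difference of the two filters
  have hdiff1 : PySem.Set.diff (R.filter p) (R.filter r) = R.filter (fun i => p i && !r i) := by
    unfold PySem.Set.diff
    rw [List.filter_filter]
    apply List.filter_congr
    intro x hx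
    cases h2 : r x <;> simp [PySem.Set.contains, h2, hx]
  have hdiff2 : PySem.Set.diff (R.filter r) (R.filter p) = R.filter (fun i => r i && !p i) := by
    unfold PySem.Set.diff
    rw [List.filter_filter]
    apply List.filter_congr
    intro x hx
    cases h1 : p x <;> simp [PySem.Set.contains, h1, hx]
  unfold PySem.Set.symmDiff PySem.Set.len
  rw [hdiff1, hdiff2, List.length_append]
  push_cast
  exact (xor_count p r R).symm

-- ===== VERDICT (by name: the statement is the Claim_ definition above) =====
theorem my_hamming_spec : Claim_equal_my_hamming := by
  intro point1 point2 _ _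
  unfold Spec_my_hamming
  exact my_hamming_eq point1 point2
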